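-- pv_equiv track=rewrite | github.com/AlgoZenithNITC/GFG_POTD_Solutions_AlgoZenithNITC | 28_05_2025_Find_rectangle_with_corners_as_1.py | ValidCorner
-- ===== SOURCE A (Python) =====
-- def ValidCorner(mat):
--     row = []
--     for i in range(len(mat)):
--         if mat[i].count(1) >= 2:
--             row.append(i)
--
--     for i in range(len(row)):
--         for j in range(i + 1, len(row)):
--             c = 0
--             for k in range(len(mat[0])):
--                 if mat[row[i]][k] == 1 and mat[row[j]][k] == 1:
--                     c += 1
--                     if c == 2:
--                         return True
--     return False
-- ===== SOURCE B (Python) =====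
-- def ValidCorner(mat):
--     m = len(mat[0]) if mat else 0
--     seen = set()
--     for r in mat:
--         if r.count(1) < 2:
--             continue
--         cols = [k for k in range(m) if r[k] == 1]
--         for idx in range(len(cols)):
--             a = cols[idx]
--             for b in cols[idx + 1:]:
--                 if (a, b) in seen:
--                     return True
--                 seen.add((a, b))
--     return False
-- ===== Notes on version B (the rewrite author's own statement) =====
-- stated objective: alternative
-- what changed: Instead of comparing every pair of candidate rows column by column, B makes a single forward pass over the rows, recording each row's pairs of 1-columns in a hash set and returning True as soon as a column pair repeats; the pairwise row scan disappears.
-- outside the precondition, e.g. on ValidCorner([[1, 1, 1], [1, 1]]): A returns True, B raises IndexError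
import Mathlib
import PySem

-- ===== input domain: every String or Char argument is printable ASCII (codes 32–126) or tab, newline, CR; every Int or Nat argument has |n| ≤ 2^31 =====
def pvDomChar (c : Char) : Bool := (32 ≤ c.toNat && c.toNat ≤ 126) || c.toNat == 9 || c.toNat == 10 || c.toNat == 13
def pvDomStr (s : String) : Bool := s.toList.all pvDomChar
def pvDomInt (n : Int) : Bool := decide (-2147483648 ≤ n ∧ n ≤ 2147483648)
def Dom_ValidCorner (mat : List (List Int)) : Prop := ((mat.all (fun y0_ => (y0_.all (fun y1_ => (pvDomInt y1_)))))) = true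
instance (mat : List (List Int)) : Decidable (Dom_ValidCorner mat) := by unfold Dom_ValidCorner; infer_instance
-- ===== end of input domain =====

-- B replaces A's pairwise row-versus-row column scan with a single pass over the rows that
-- records each row's pairs of 1-columns in a set and fires when a pair repeats.

-- ===== PORT A =====
-- inner loop 'c = 0; for k in range(len(mat[0])): … c += 1; if c == 2: return True' (state = (c, returned))
def VC_inner (a b : List Int) (m : Nat) : Bool :=
  ((List.range m).foldl
    (fun (st : Nat × Bool) k =>
      if st.2 then st
      else if a.getD k 0 == 1 && b.getD k 0 == 1 then (st.1 + 1, st.1 + 1 == 2) else st)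
    (0, false)).2

-- 'row = []; for i in range(len(mat)): if mat[i].count(1) >= 2: row.append(i)'
def VC_row (mat : List (List Int)) : List Nat :=
  (List.range mat.length).foldl
    (fun acc i => if 2 ≤ (mat.getD i []).count 1 then acc ++ [i] else acc) []

def ValidCorner (mat : List (List Int)) : Bool :=
  (List.range (VC_row mat).length).any (fun i =>
    (List.range' (i + 1) ((VC_row mat).length - (i + 1))).any (fun j =>
      VC_inner (mat.getD ((VC_row mat).getD i 0) []) (mat.getD ((VC_row mat).getD j 0) [])
        (mat.headD []).length))

-- ===== PORT B =====
-- 'cols = [k for k in range(m) if r[k] == 1]'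
def VC_cols (m : Nat) (r : List Int) : List Nat :=
  (List.range m).filter (fun k => r.getD k 0 == 1)

-- pairs (cols[idx], b) for b in cols[idx+1:], for idx in range(len(cols))
def VC_pairsOf : List Nat → List (Nat × Nat)
  | [] => []
  | a :: rest => rest.map (fun b => (a, b)) ++ VC_pairsOf rest

-- 'if (a, b) in seen: return True; seen.add((a, b))' over the row's column pairs
def VC_scan : List (Nat × Nat) → PySem.Set (Nat × Nat) → Bool × PySem.Set (Nat × Nat)
  | [], seen => (false, seen)
  | p :: ps, seen =>
    if PySem.Set.contains seen p then (true, seen) else VC_scan ps (PySem.Set.add seen p)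

def VC_go (rows : List (List Int)) (m : Nat) (seen : PySem.Set (Nat × Nat)) : Bool :=
  match rows with
  | [] => false
  | r :: rest =>
    if r.count 1 < 2 then VC_go rest m seen
    else
      match VC_scan (VC_pairsOf (VC_cols m r)) seen with
      | (true, _) => true
      | (false, seen') => VC_go rest m seen'

def ValidCorner_alt (mat : List (List Int)) : Bool :=
  VC_go mat (mat.headD []).length PySem.Set.empty

-- ===== PRECONDITION & SPEC =====
-- Pre_ excludes ragged matrices in which some row holding at least two 1s is shorter than the
-- first row: there the column scan raises IndexError in both programs on most inputs, and where
-- A happens to return True before reaching the short row its value is an accident of scan order.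
def Pre_ValidCorner (mat : List (List Int)) : Prop :=
  ∀ r ∈ mat, 2 ≤ r.count 1 → (mat.headD []).length ≤ r.length
instance (mat : List (List Int)) : Decidable (Pre_ValidCorner mat) := by
  unfold Pre_ValidCorner; infer_instance

def pvWitness_ValidCorner : List (List Int) := [[1, 0, 1], [0, 1, 0], [1, 0, 1]]

def Spec_ValidCorner (mat : List (List Int)) (out : Bool) : Prop := out = ValidCorner_alt mat
instance (mat : List (List Int)) (out : Bool) : Decidable (Spec_ValidCorner mat out) := by
  unfold Spec_ValidCorner; infer_instance

-- ===== CLAIM (what is proved, stated in full; the proofs are below) =====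
def Claim_equal_ValidCorner : Prop :=
  ∀ (mat : List (List Int)), Dom_ValidCorner mat → Pre_ValidCorner mat →
    Spec_ValidCorner mat (ValidCorner mat)

-- ===== LEMMAS AND PROOFS =====

-- the rows x and y share a pair of 1-columns below m
def VC_share (m : Nat) (x y : List Int) : Prop :=
  ∃ p, p ∈ VC_pairsOf (VC_cols m x) ∧ p ∈ VC_pairsOf (VC_cols m y)

-- middle form both ports are reduced to
def VC_mid (mat : List (List Int)) : Prop :=
  ∃ a b : Nat, a < b ∧ b < mat.length ∧
    2 ≤ (mat.getD a []).count 1 ∧ 2 ≤ (mat.getD b []).count 1 ∧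
    VC_share (mat.headD []).length (mat.getD a []) (mat.getD b [])

lemma VC_inner_stuck (ks : List Nat) (f : Nat × Bool → Nat → Nat × Bool)
    (hf : ∀ st k, st.2 = true → f st k = st) (c : Nat) :
    ks.foldl f (c, true) = (c, true) := by
  induction ks with
  | nil => rfl
  | cons k ks ih => simpa [hf (c, true) k rfl] using ih

lemma VC_inner_aux (pred : Nat → Bool) (ks : List Nat) :
    ∀ c : Nat, c < 2 →
    (((ks.foldl (fun (st : Nat × Bool) k =>
        if st.2 then st
        else if pred k then (st.1 + 1, st.1 + 1 == 2) else st) (c, false)).2 = true)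
      ↔ 2 ≤ c + (ks.filter pred).length) := by
  induction ks with
  | nil => intro c hc; simp; omega
  | cons k ks ih =>
    intro c hc
    simp only [List.foldl_cons, List.filter_cons]
    by_cases hk : pred k = true
    · simp only [hk, if_true, Bool.false_eq_true, if_false]
      by_cases h2 : c + 1 = 2
      · have hb : (c + 1 == 2) = true := by simp [h2]
        rw [hb, VC_inner_stuck _ _ (by intro st k h; simp [h]) (c + 1)]
        simp; omega
      · have hb : (c + 1 == 2) = false := by simp; omega
        rw [hb, ih (c + 1) (by omega)]
        simp; omega
    · simp only [Bool.not_eq_true] at hk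
      simp only [hk, Bool.false_eq_true, if_false]
      rw [ih c hc]

lemma VC_inner_iff (a b : List Int) (m : Nat) :
    VC_inner a b m = true ↔
      2 ≤ ((List.range m).filter (fun k => a.getD k 0 == 1 && b.getD k 0 == 1)).length := by
  unfold VC_inner
  simpa only [Nat.zero_add] using
    VC_inner_aux (fun k => a.getD k 0 == 1 && b.getD k 0 == 1) (List.range m) 0 (by omega)

lemma VC_pairsOf_mem (l : List Nat) (hl : l.Pairwise (· < ·)) (p : Nat × Nat) :
    p ∈ VC_pairsOf l ↔ p.1 ∈ l ∧ p.2 ∈ l ∧ p.1 < p.2 := by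
  obtain ⟨p1, p2⟩ := p
  induction l with
  | nil => simp [VC_pairsOf]
  | cons a rest ih =>
    rcases List.pairwise_cons.mp hl with ⟨ha, hrest⟩
    simp only [VC_pairsOf, List.mem_append, List.mem_map, ih hrest, List.mem_cons, Prod.mk.injEq]
    constructor
    · rintro (⟨b, hb, rfl, rfl⟩ | ⟨h1, h2, h3⟩)
      · exact ⟨Or.inl rfl, Or.inr hb, ha _ hb⟩
      · exact ⟨Or.inr h1, Or.inr h2, h3⟩
    · rintro ⟨h1 | h1, h2 | h2, h3⟩
      · omega
      · exact Or.inl ⟨p2, h2, h1.symm, rfl⟩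
      · have := ha p1 h1; omega
      · exact Or.inr ⟨h1, h2, h3⟩

lemma VC_pairsOf_nodup (l : List Nat) (hl : l.Pairwise (· < ·)) :
    (VC_pairsOf l).Nodup := by
  induction l with
  | nil => simp [VC_pairsOf]
  | cons a rest ih =>
    rcases List.pairwise_cons.mp hl with ⟨ha, hrest⟩
    refine List.Nodup.append ?_ (ih hrest) ?_
    · exact List.Nodup.map (fun x y h => by simpa using h)
        (List.Pairwise.imp (fun h => by omega) hrest)
    · intro x hx hx'
      obtain ⟨b, hb, rfl⟩ := List.mem_map.mp hx
      have := (VC_pairsOf_mem rest hrest (a, b)).mp hx'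
      have := ha a this.1
      omega

lemma VC_two_le_length {l : List Nat} {x y : Nat} (hx : x ∈ l) (hy : y ∈ l) (hxy : x ≠ y) :
    2 ≤ l.length := by
  match l with
  | [] => simp at hx
  | [z] => simp at hx hy; omega
  | a :: b :: t => simp

lemma VC_cols_pairwise (m : Nat) (r : List Int) : (VC_cols m r).Pairwise (· < ·) :=
  List.Pairwise.filter _ List.pairwise_lt_range

lemma VC_share_iff (m : Nat) (x y : List Int) :
    VC_share m x y ↔
      2 ≤ ((List.range m).filter (fun k => x.getD k 0 == 1 && y.getD k 0 == 1)).length := by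
  have hmemL : ∀ k : Nat, k ∈ (List.range m).filter (fun k => x.getD k 0 == 1 && y.getD k 0 == 1) ↔
      (k ∈ VC_cols m x ∧ k ∈ VC_cols m y) := by
    intro k; simp [VC_cols, List.mem_filter]; tauto
  constructor
  · rintro ⟨p, hpx, hpy⟩
    rw [VC_pairsOf_mem _ (VC_cols_pairwise m x)] at hpx
    rw [VC_pairsOf_mem _ (VC_cols_pairwise m y)] at hpy
    exact VC_two_le_length ((hmemL p.1).mpr ⟨hpx.1, hpy.1⟩) ((hmemL p.2).mpr ⟨hpx.2.1, hpy.2.1⟩)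
      (by omega)
  · intro hlen
    have hpw : ((List.range m).filter (fun k => x.getD k 0 == 1 && y.getD k 0 == 1)).Pairwise (· < ·) :=
      List.Pairwise.filter _ List.pairwise_lt_range
    match hL : (List.range m).filter (fun k => x.getD k 0 == 1 && y.getD k 0 == 1), hlen' : hlen with
    | a :: b :: t, _ =>
      rw [hL] at hpw
      have hab : a < b := (List.pairwise_cons.mp hpw).1 b (by simp)
      have haM := (hmemL a).mp (by rw [hL]; simp)
      have hbM := (hmemL b).mp (by rw [hL]; simp)
      refine ⟨(a, b), ?_, ?_⟩
      · rw [VC_pairsOf_mem _ (VC_cols_pairwise m x)]; exact ⟨haM.1, hbM.1, hab⟩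
      · rw [VC_pairsOf_mem _ (VC_cols_pairwise m y)]; exact ⟨haM.2, hbM.2, hab⟩

lemma VC_row_eq (mat : List (List Int)) :
    VC_row mat = (List.range mat.length).filter (fun i => decide (2 ≤ (mat.getD i []).count 1)) := by
  have h := PySem.List.foldl_append_if (fun i => decide (2 ≤ (mat.getD i []).count 1))
    (id : Nat → Nat) (List.range mat.length) []
  simp only [decide_eq_true_eq, id_eq, List.map_id, List.nil_append] at h
  simpa [VC_row] using h

lemma VC_row_pairwise (mat : List (List Int)) : (VC_row mat).Pairwise (· < ·) := by
  rw [VC_row_eq]; exact List.Pairwise.filter _ List.pairwise_lt_range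

lemma VC_mem_row (mat : List (List Int)) (i : Nat) :
    i ∈ VC_row mat ↔ i < mat.length ∧ 2 ≤ (mat.getD i []).count 1 := by
  rw [VC_row_eq]; simp

lemma VC_anypairs (mat : List (List Int)) (row : List Nat) (hrow : row.Pairwise (· < ·)) :
    ((List.range row.length).any (fun i =>
      (List.range' (i + 1) (row.length - (i + 1))).any (fun j =>
        VC_inner (mat.getD (row.getD i 0) []) (mat.getD (row.getD j 0) [])
          (mat.headD []).length)) = true)
    ↔ ∃ a b : Nat, a ∈ row ∧ b ∈ row ∧ a < b ∧
        VC_inner (mat.getD a []) (mat.getD b []) (mat.headD []).length = true := by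
  simp only [List.any_eq_true, List.mem_range, List.mem_range'_1]
  constructor
  · rintro ⟨i, hi, j, ⟨hj1, hj2⟩, hg⟩
    have hj : j < row.length := by omega
    rw [List.getD_eq_getElem _ _ hi, List.getD_eq_getElem _ _ hj] at hg
    exact ⟨row[i], row[j], List.getElem_mem _, List.getElem_mem _,
      List.pairwise_iff_getElem.mp hrow i j hi hj (by omega), hg⟩
  · rintro ⟨a, b, ha, hb, hab, hg⟩
    obtain ⟨i, hi, rfl⟩ := List.mem_iff_getElem.mp ha
    obtain ⟨j, hj, rfl⟩ := List.mem_iff_getElem.mp hb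
    have hij : i < j := by
      rcases Nat.lt_trichotomy i j with h | h | h
      · exact h
      · subst h; omega
      · have := List.pairwise_iff_getElem.mp hrow j i hj hi h; omega
    refine ⟨i, by omega, j, ⟨by omega, by omega⟩, ?_⟩
    rw [List.getD_eq_getElem _ _ hi, List.getD_eq_getElem _ _ hj]
    exact hg

lemma VC_A_iff (mat : List (List Int)) : ValidCorner mat = true ↔ VC_mid mat := by
  unfold ValidCorner
  rw [VC_anypairs mat (VC_row mat) (VC_row_pairwise mat)]
  unfold VC_mid
  constructor
  · rintro ⟨a, b, ha, hb, hab, hg⟩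
    rw [VC_mem_row] at ha hb
    exact ⟨a, b, hab, hb.1, ha.2, hb.2,
      (VC_share_iff _ _ _).mpr ((VC_inner_iff _ _ _).mp hg)⟩
  · rintro ⟨a, b, hab, hbn, hqa, hqb, hsh⟩
    exact ⟨a, b, (VC_mem_row mat a).mpr ⟨by omega, hqa⟩, (VC_mem_row mat b).mpr ⟨hbn, hqb⟩, hab,
      (VC_inner_iff _ _ _).mpr ((VC_share_iff _ _ _).mp hsh)⟩

lemma VC_scan_true (ps : List (Nat × Nat)) (seen : PySem.Set (Nat × Nat))
    (h : ∃ p ∈ ps, p ∈ seen) : (VC_scan ps seen).1 = true := by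
  induction ps generalizing seen with
  | nil => simp at h
  | cons p ps ih =>
    unfold VC_scan
    by_cases hc : PySem.Set.contains seen p = true
    · rw [if_pos hc]
    · rw [if_neg hc]
      rcases h with ⟨q, hq, hqs⟩
      rcases List.mem_cons.mp hq with rfl | hq'
      · exact absurd ((PySem.Set.contains_iff seen q).mpr hqs) hc
      · exact ih _ ⟨q, hq', (PySem.Set.mem_add seen p q).mpr (Or.inl hqs)⟩

lemma VC_scan_false (ps : List (Nat × Nat)) :
    ∀ seen : PySem.Set (Nat × Nat), ps.Nodup → (∀ p ∈ ps, p ∉ seen) →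
    (VC_scan ps seen).1 = false ∧ ∀ x, (x ∈ (VC_scan ps seen).2 ↔ x ∈ seen ∨ x ∈ ps) := by
  induction ps with
  | nil => intro seen _ _; simp [VC_scan]
  | cons p ps ih =>
    intro seen hn h
    rcases List.nodup_cons.mp hn with ⟨hp, hn'⟩
    unfold VC_scan
    have hc : PySem.Set.contains seen p ≠ true := by
      intro hc; exact h p (by simp) ((PySem.Set.contains_iff seen p).mp hc)
    rw [if_neg hc]
    have h' : ∀ q ∈ ps, q ∉ PySem.Set.add seen p := by
      intro q hq hmem
      rcases (PySem.Set.mem_add seen p q).mp hmem with h1 | rfl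
      · exact h q (by simp [hq]) h1
      · exact hp hq
    obtain ⟨h1, h2⟩ := ih (PySem.Set.add seen p) hn' h'
    refine ⟨h1, fun x => ?_⟩
    rw [h2 x, PySem.Set.mem_add]
    simp
    tauto

-- recursive characterisation of the B-side single pass
def VC_sh (m : Nat) : List (List Int) → Prop
  | [] => False
  | r :: rest =>
    (2 ≤ r.count 1 ∧ ∃ r' ∈ rest, 2 ≤ r'.count 1 ∧ VC_share m r r') ∨ VC_sh m rest

lemma VC_go_iff (m : Nat) (rows : List (List Int)) :
    ∀ seen : PySem.Set (Nat × Nat),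
    (VC_go rows m seen = true ↔
      (∃ r ∈ rows, 2 ≤ r.count 1 ∧ ∃ p ∈ VC_pairsOf (VC_cols m r), p ∈ seen) ∨ VC_sh m rows) := by
  induction rows with
  | nil => intro seen; simp [VC_go, VC_sh]
  | cons r rest ih =>
    intro seen
    unfold VC_go
    by_cases hq : r.count 1 < 2
    · rw [if_pos hq, ih seen]
      simp only [VC_sh, List.mem_cons]
      constructor
      · rintro (⟨r', hr', h⟩ | h)
        · exact Or.inl ⟨r', Or.inr hr', h⟩
        · exact Or.inr (Or.inr h)
      · rintro (⟨r', hr' | hr', h⟩ | ⟨h, _⟩ | h)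
        · subst hr'; omega
        · exact Or.inl ⟨r', hr', h⟩
        · omega
        · exact Or.inr h
    · rw [if_neg hq]
      have hq' : 2 ≤ r.count 1 := by omega
      by_cases hex : ∃ p ∈ VC_pairsOf (VC_cols m r), p ∈ seen
      · have h1 := VC_scan_true _ seen hex
        rcases hs : VC_scan (VC_pairsOf (VC_cols m r)) seen with ⟨b, s'⟩
        rw [hs] at h1; subst h1
        refine iff_of_true ?_ (Or.inl ⟨r, by simp, hq', hex⟩)
        rfl
      · simp only [not_exists, not_and] at hex
        obtain ⟨h1, h2⟩ := VC_scan_false _ seen (VC_pairsOf_nodup _ (VC_cols_pairwise m r)) hex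
        rcases hs : VC_scan (VC_pairsOf (VC_cols m r)) seen with ⟨b, s'⟩
        rw [hs] at h1 h2; subst h1
        show VC_go rest m s' = true ↔ _
        rw [ih s']
        simp only [VC_sh, List.mem_cons]
        constructor
        · rintro (⟨r', hr', hq'', p, hp, hps⟩ | h)
          · rcases (h2 p).mp hps with hseen | hPSr
            · exact Or.inl ⟨r', Or.inr hr', hq'', p, hp, hseen⟩
            · exact Or.inr (Or.inl ⟨hq', r', hr', hq'', p, hPSr, hp⟩)
          · exact Or.inr (Or.inr h)
        · rintro (⟨r', hr' | hr', hq'', p, hp, hps⟩ | ⟨_, r', hr', hq'', p, hp1, hp2⟩ | h)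
          · subst hr'
            exact absurd hps (hex p hp)
          · exact Or.inl ⟨r', hr', hq'', p, hp, (h2 p).mpr (Or.inl hps)⟩
          · exact Or.inl ⟨r', hr', hq'', p, hp2, (h2 p).mpr (Or.inr hp1)⟩
          · exact Or.inr h

lemma VC_sh_iff (m : Nat) (rows : List (List Int)) :
    VC_sh m rows ↔
      ∃ a b : Nat, a < b ∧ b < rows.length ∧
        2 ≤ (rows.getD a []).count 1 ∧ 2 ≤ (rows.getD b []).count 1 ∧
        VC_share m (rows.getD a []) (rows.getD b []) := by
  induction rows with
  | nil => simp [VC_sh]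
  | cons r rest ih =>
    simp only [VC_sh, ih, List.length_cons]
    constructor
    · rintro (⟨hq, r', hr', hq', hsh⟩ | ⟨a, b, hab, hb, h3, h4, h5⟩)
      · obtain ⟨k, hk, rfl⟩ := List.mem_iff_getElem.mp hr'
        refine ⟨0, k + 1, by omega, by omega, ?_, ?_, ?_⟩
        · simpa using hq
        · simpa [List.getElem?_eq_getElem hk] using hq'
        · simpa [List.getElem?_eq_getElem hk] using hsh
      · exact ⟨a + 1, b + 1, by omega, by omega, by simpa using h3, by simpa using h4,
          by simpa using h5⟩
    · rintro ⟨a, b, hab, hb, h3, h4, h5⟩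
      match a, b, hab with
      | 0, c + 1, _ =>
        have hc : c < rest.length := by omega
        refine Or.inl ⟨by simpa using h3, rest.getD c [], ?_, by simpa using h4, by simpa using h5⟩
        rw [List.getD_eq_getElem rest [] hc]
        exact List.getElem_mem _
      | d + 1, e + 1, _ =>
        exact Or.inr ⟨d, e, by omega, by omega, by simpa using h3, by simpa using h4,
          by simpa using h5⟩

lemma VC_B_iff (mat : List (List Int)) : ValidCorner_alt mat = true ↔ VC_mid mat := by
  unfold ValidCorner_alt
  rw [VC_go_iff _ mat PySem.Set.empty]
  have hempty : (∃ r ∈ mat, 2 ≤ r.count 1 ∧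
      ∃ p ∈ VC_pairsOf (VC_cols (mat.headD []).length r), p ∈ PySem.Set.empty) ↔ False := by
    simp [PySem.Set.empty]
  rw [hempty, VC_sh_iff]
  unfold VC_mid
  simp

-- ===== VERDICT (by name: the statement is the Claim_ definition above) =====
theorem ValidCorner_spec : Claim_equal_ValidCorner := by
  intro mat _ _
  unfold Spec_ValidCorner
  rw [Bool.eq_iff_iff, VC_A_iff, VC_B_iff]
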